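-- pv_equiv track=rewrite | github.com/yuniteh/wrist_2dof | pyboard/crc_calc.py | int2Hex
-- ===== SOURCE A (Python) =====
-- OFFSET = 1 << 32
--
-- MASK = OFFSET - 1
--
-- def int2Hex(num):
--     hex = '%08x' % (num + OFFSET & MASK)
--     bytes = []
--     for i in range(0, 4):
--         bytes.append(hex[i * 2: i * 2 + 2])
--     tmpV = bytes[::-1]
--     outVal = tmpV[0] + tmpV[1] + tmpV[2] + tmpV[3]
--     return outVal
-- ===== SOURCE B (Python) =====
-- OFFSET = 1 << 32
--
-- MASK = OFFSET - 1
--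
-- def int2Hex(num):
--     value = num + OFFSET & MASK
--     return value.to_bytes(4, 'little').hex()
-- ===== Notes on version B (the rewrite author's own statement) =====
-- stated objective: idiomatic
-- what changed: Replaces formatting big-endian hex then manually slicing into byte pairs, reversing and concatenating with serializing the masked 32-bit value directly to little-endian bytes via int.to_bytes(4,'little').hex().
import Mathlib
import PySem

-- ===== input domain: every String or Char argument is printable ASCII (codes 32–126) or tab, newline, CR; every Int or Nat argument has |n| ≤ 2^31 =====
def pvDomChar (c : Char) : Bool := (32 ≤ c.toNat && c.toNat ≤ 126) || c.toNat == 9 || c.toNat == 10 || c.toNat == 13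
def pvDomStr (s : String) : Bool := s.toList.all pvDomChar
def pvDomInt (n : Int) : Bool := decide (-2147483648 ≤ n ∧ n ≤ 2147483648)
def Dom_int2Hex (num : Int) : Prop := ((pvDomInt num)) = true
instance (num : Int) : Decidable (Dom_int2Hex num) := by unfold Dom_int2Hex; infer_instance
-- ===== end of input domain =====

-- B serializes the masked 32-bit value to little-endian bytes and hex-encodes them,
-- instead of A's big-endian '%08x' formatting followed by manual pair slicing and reversal (idiomatic).

-- ===== PORT A =====
-- lowercase hex digit character, as Python's '%x' produces
def hexDigitChar (d : Nat) : Char := if d < 10 then Char.ofNat (48 + d) else Char.ofNat (87 + d)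

-- hex digits of a nonnegative integer, most significant first ([] for 0); the core of '%x'
def hexCharsA : Nat → List Char
  | 0 => []
  | n+1 => hexCharsA ((n+1) / 16) ++ [hexDigitChar ((n+1) % 16)]
decreasing_by exact Nat.div_lt_self (Nat.succ_pos n) (by norm_num)

-- '%08x' % v for v ≥ 0: hex digits left-padded with '0' to width 8 (exact: v is masked below 2^32)
def format08x (v : Nat) : List Char :=
  let ds := hexCharsA v
  List.replicate (8 - ds.length) '0' ++ ds

def int2Hex (num : Int) : String :=
  -- hex = '%08x' % (num + OFFSET & MASK); the mask makes the value nonnegative, so .toNat is exact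
  let hex : List Char := format08x (Int.land (num + 4294967296) 4294967295).toNat
  -- for i in range(0, 4): bytes.append(hex[i*2 : i*2+2])
  let bytes : List (List Char) :=
    (PySem.List.pyRange 0 4 1).foldl
      (fun acc i => acc ++ [PySem.List.slice hex (some (i * 2)) (some (i * 2 + 2))]) []
  -- tmpV = bytes[::-1]
  let tmpV := bytes.reverse
  -- tmpV[0] + tmpV[1] + tmpV[2] + tmpV[3]; all four indices are in range (bytes has length 4)
  String.ofList (PySem.List.pyGetD tmpV 0 [] ++ PySem.List.pyGetD tmpV 1 [] ++
             PySem.List.pyGetD tmpV 2 [] ++ PySem.List.pyGetD tmpV 3 [])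

-- ===== PORT B =====
-- hex-encoding of one byte: two lowercase hex digits (bytes.hex() per byte)
def byteHex (b : Nat) : List Char := [hexDigitChar (b / 16), hexDigitChar (b % 16)]

def int2Hex_alt (num : Int) : String :=
  -- value = num + OFFSET & MASK (nonnegative, < 2^32, so .toNat is exact)
  let n : Nat := (Int.land (num + 4294967296) 4294967295).toNat
  -- value.to_bytes(4, 'little'): bytes little-endian, then .hex() encodes each byte
  String.ofList (([n % 256, n / 256 % 256, n / 65536 % 256, n / 16777216 % 256].map byteHex).flatten)

-- ===== PRECONDITION & SPEC =====
def Spec_int2Hex (num : Int) (out : String) : Prop := out = int2Hex_alt num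
instance (num : Int) (out : String) : Decidable (Spec_int2Hex num out) := by unfold Spec_int2Hex; infer_instance

-- ===== CLAIM (what is proved, stated in full; the proofs are below) =====
def Claim_equal_int2Hex : Prop := ∀ (num : Int), Dom_int2Hex num → Spec_int2Hex num (int2Hex num)

-- ===== LEMMAS AND PROOFS =====

-- fixed-width big-endian hex digits
def toFixed : Nat → Nat → List Char
  | 0, _ => []
  | k+1, n => toFixed k (n / 16) ++ [hexDigitChar (n % 16)]

theorem length_hexCharsA_le (k : Nat) : ∀ n, n < 16 ^ k → (hexCharsA n).length ≤ k := by
  induction k with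
  | zero => intro n h; interval_cases n; simp [hexCharsA]
  | succ k ih =>
    intro n h
    match n with
    | 0 => simp [hexCharsA]
    | m+1 =>
      rw [hexCharsA]
      simp only [List.length_append, List.length_singleton]
      have := ih ((m+1)/16) (by
        have : (m+1)/16 < 16 ^ (k+1) / 16 + 1 := by omega
        have h16 : (16:Nat) ^ (k+1) / 16 = 16 ^ k := by
          rw [pow_succ]; exact Nat.mul_div_cancel _ (by norm_num)
        omega)
      omega

theorem pad_hexCharsA (k : Nat) : ∀ n, n < 16 ^ k →
    List.replicate (k - (hexCharsA n).length) '0' ++ hexCharsA n = toFixed k n := by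
  induction k with
  | zero => intro n h; interval_cases n; simp [hexCharsA, toFixed]
  | succ k ih =>
    intro n h
    match n with
    | 0 =>
      simp only [hexCharsA, List.length_nil, Nat.sub_zero, List.append_nil]
      have : toFixed (k+1) 0 = List.replicate (k+1) '0' := by
        clear ih h
        induction k with
        | zero => simp [toFixed, hexDigitChar]
        | succ k ih2 =>
          rw [toFixed]
          simp only [Nat.zero_div] at ih2 ⊢
          rw [ih2]
          rw [List.replicate_succ' (n := k+1)]
          simp [hexDigitChar]
      rw [this]
    | m+1 =>
      rw [hexCharsA, toFixed]
      have hlt : (m+1)/16 < 16 ^ k := by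
        have h16 : (16:Nat) ^ (k+1) = 16 ^ k * 16 := pow_succ 16 k
        omega
      have hlen := length_hexCharsA_le k ((m+1)/16) hlt
      rw [← ih ((m+1)/16) hlt]
      simp only [List.length_append, List.length_singleton]
      have : k + 1 - ((hexCharsA ((m+1)/16)).length + 1) = k - (hexCharsA ((m+1)/16)).length := by
        omega
      rw [this, List.append_assoc]

theorem format08x_eq (n : Nat) (h : n < 4294967296) :
    format08x n = toFixed 8 n := by
  have : n < 16 ^ 8 := by norm_num; omega
  simpa [format08x] using pad_hexCharsA 8 n this

theorem land_mask (num : Int) (h : 0 ≤ num + 4294967296) :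
    (Int.land (num + 4294967296) 4294967295).toNat = (num + 4294967296).toNat % 4294967296 := by
  obtain ⟨k, hk⟩ := Int.eq_ofNat_of_zero_le h
  rw [hk]
  have h1 : (Int.land (k : Int) 4294967295) = ((k &&& 4294967295 : Nat) : Int) := by
    exact_mod_cast rfl
  rw [h1]
  have h2 : k &&& 4294967295 = k % 4294967296 := by
    have := Nat.and_two_pow_sub_one_eq_mod k 32
    norm_num at this; omega
  simp [h2]; omega

theorem core_eq (n : Nat) (h : n < 4294967296) :
    (let hex : List Char := format08x n
     let bytes : List (List Char) :=
       (PySem.List.pyRange 0 4 1).foldl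
         (fun acc i => acc ++ [PySem.List.slice hex (some (i * 2)) (some (i * 2 + 2))]) []
     let tmpV := bytes.reverse
     String.ofList (PySem.List.pyGetD tmpV 0 [] ++ PySem.List.pyGetD tmpV 1 [] ++
                PySem.List.pyGetD tmpV 2 [] ++ PySem.List.pyGetD tmpV 3 [])) =
    String.ofList (([n % 256, n / 256 % 256, n / 65536 % 256, n / 16777216 % 256].map byteHex).flatten) := by
  rw [format08x_eq n h]
  simp only [List.map_cons, List.map_nil, byteHex, List.flatten_cons, List.flatten_nil,
    List.cons_append, List.nil_append, List.append_nil]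
  rw [show n % 256 / 16 = n / 16 % 16 from by omega,
      show n % 256 % 16 = n % 16 from by omega,
      show n / 256 % 256 / 16 = n / 16 / 16 / 16 % 16 from by omega,
      show n / 256 % 256 % 16 = n / 16 / 16 % 16 from by omega,
      show n / 65536 % 256 / 16 = n / 16 / 16 / 16 / 16 / 16 % 16 from by omega,
      show n / 65536 % 256 % 16 = n / 16 / 16 / 16 / 16 % 16 from by omega,
      show n / 16777216 % 256 / 16 = n / 16 / 16 / 16 / 16 / 16 / 16 / 16 % 16 from by omega,
      show n / 16777216 % 256 % 16 = n / 16 / 16 / 16 / 16 / 16 / 16 % 16 from by omega]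
  rfl

-- ===== VERDICT (by name: the statement is the Claim_ definition above) =====
theorem int2Hex_spec : Claim_equal_int2Hex := by
  intro num hdom
  unfold Spec_int2Hex int2Hex int2Hex_alt
  have hnn : 0 ≤ num + 4294967296 := by
    unfold Dom_int2Hex pvDomInt at hdom
    simp at hdom
    omega
  have hlt : (Int.land (num + 4294967296) 4294967295).toNat < 4294967296 := by
    rw [land_mask num hnn]; omega
  exact core_eq _ hlt
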